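-- pv_equiv track=rewrite | github.com/NinaBorys/big_integer | test.py | transform
-- ===== SOURCE A (Python) =====
-- def transform(x):
--     temp_arr=''
--     final_arr = []
--     for i in range(len(x)-1,-1,-1):
--         if len(temp_arr)==4:
--             final_arr.append(temp_arr)
--             temp_arr=x[i]
--             if i == 0:
--                 final_arr.append(temp_arr)
--         elif i == 0:
--             temp_arr=x[i]+temp_arr
--             final_arr.append(temp_arr)
--             temp_arr=''
--         else:
--             temp_arr=x[i]+temp_arr
--     for i in range(0,len(final_arr),1):
--         final_arr[i]=int(final_arr[i],16)
--     return final_arr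
-- ===== SOURCE B (Python) =====
-- def transform(x):
--     final_arr = []
--     i = len(x)
--     while i > 0:
--         start = max(0, i - 4)
--         final_arr.append(int(x[start:i], 16))
--         i = start
--     return final_arr
-- ===== Notes on version B (the rewrite author's own statement) =====
-- stated objective: simpler
-- what changed: B strides over the string in 4-character slices from the right, converting each slice inline with int(.,16), replacing A's char-by-char buffer/flush/counter loop and its second conversion pass; Pre_ excludes exactly the strings on which A raises ValueError (some right-aligned 4-char chunk does not parse as base-16).
import Mathlib
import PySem

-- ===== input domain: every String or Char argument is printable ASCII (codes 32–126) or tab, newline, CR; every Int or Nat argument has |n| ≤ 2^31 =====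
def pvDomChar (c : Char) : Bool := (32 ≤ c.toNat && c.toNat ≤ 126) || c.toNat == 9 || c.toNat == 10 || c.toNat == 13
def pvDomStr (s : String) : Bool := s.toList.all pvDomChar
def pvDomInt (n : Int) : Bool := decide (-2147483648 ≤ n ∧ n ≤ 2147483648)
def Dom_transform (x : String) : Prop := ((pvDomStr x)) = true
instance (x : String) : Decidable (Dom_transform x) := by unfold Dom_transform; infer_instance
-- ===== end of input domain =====

-- B replaces A's char-by-char buffer/flush loop plus a second conversion pass by one
-- stride-of-4 slicing loop from the right, converting each slice inline (simpler; same cost).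

-- int(s, 16): exact via PySem; the .getD 0 is never reached under Pre_transform (every chunk parses).
def pvHex (cs : List Char) : Int := (PySem.Int.ofCharsBase? cs 16).getD 0

-- ===== PORT A =====
-- one iteration of A's loop body (branches in A's order)
def aStep (c : Char) (i : Nat) (temp : List Char) (final : List (List Char)) :
    List Char × List (List Char) :=
  if temp.length = 4 then
    let final := final ++ [temp]
    let temp := [c]
    if i = 0 then (temp, final ++ [temp]) else (temp, final)
  else if i = 0 then ([], final ++ [c :: temp])
  else (c :: temp, final)

-- for i in range(len(x)-1, -1, -1): index i counts down to 0; cs.getD i ' ' is x[i] (always in range here)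
def aLoop (cs : List Char) (i : Nat) (temp : List Char) (final : List (List Char)) :
    List (List Char) :=
  let p := aStep (cs.getD i ' ') i temp final
  if i = 0 then p.2 else aLoop cs (i - 1) p.1 p.2
termination_by i
decreasing_by omega

def transform (x : String) : List Int :=
  let cs := x.toList
  let final := if cs.length = 0 then [] else aLoop cs (cs.length - 1) [] []
  -- second pass: for i in range(0, len(final_arr), 1): final_arr[i] = int(final_arr[i], 16)
  final.map pvHex

-- ===== PORT B =====
-- while i > 0: start = max(0, i-4); append int(x[start:i], 16); i = start
def bLoop (cs : List Char) (i : Nat) : List Int :=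
  if i = 0 then [] else
    let start := i - 4   -- Nat subtraction = max(0, i - 4)
    pvHex (PySem.List.slice cs (some (start : Int)) (some (i : Int))) :: bLoop cs start
termination_by i
decreasing_by omega

def transform_alt (x : String) : List Int :=
  bLoop x.toList x.toList.length

-- ===== PRECONDITION & SPEC =====
-- Pre_ excludes exactly the strings on which A raises ValueError: those where some
-- right-aligned 4-character slice x[max(0,len-4k-4):len-4k] does not parse under int(., 16).
def Pre_transform (x : String) : Prop :=
  ((List.range ((x.toList.length + 3) / 4)).all fun k =>
    (PySem.Int.ofCharsBase?
      (PySem.List.slice x.toList (some ((x.toList.length - 4 * k - 4 : Nat) : Int))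
                                 (some ((x.toList.length - 4 * k : Nat) : Int))) 16).isSome) = true
instance (x : String) : Decidable (Pre_transform x) := by unfold Pre_transform; infer_instance

def pvWitness_transform : String := "1a2B3"

def Spec_transform (x : String) (out : List Int) : Prop := out = transform_alt x
instance (x : String) (out : List Int) : Decidable (Spec_transform x out) := by unfold Spec_transform; infer_instance

-- ===== CLAIM (what is proved, stated in full; the proofs are below) =====
def Claim_equal_transform : Prop := ∀ (x : String), Dom_transform x → Pre_transform x → Spec_transform x (transform x)

-- ===== LEMMAS AND PROOFS =====

-- right-aligned chunks of a string, rightmost chunk first (proof-only characterisation)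
def rchunks (s : List Char) : List (List Char) :=
  if s = [] then []
  else if s.length ≤ 4 then [s]
  else s.drop (s.length - 4) :: rchunks (s.take (s.length - 4))
termination_by s.length
decreasing_by simp_all; omega

lemma rchunks_small (s : List Char) (h1 : s ≠ []) (h2 : s.length ≤ 4) : rchunks s = [s] := by
  rw [rchunks]; simp [h1, h2]

lemma rchunks_append4 (t temp : List Char) (ht : t ≠ []) (h : temp.length = 4) :
    rchunks (t ++ temp) = temp :: rchunks t := by
  have hlen : (t ++ temp).length = t.length + 4 := by simp [h]
  have ht' : 0 < t.length := List.length_pos_iff.mpr ht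
  have hne : t ++ temp ≠ [] := by
    intro hh
    exact ht (List.append_eq_nil_iff.mp hh).1
  have hgt : ¬ (t ++ temp).length ≤ 4 := by rw [hlen]; omega
  rw [rchunks, if_neg hne, if_neg hgt, hlen]
  have h4 : t.length + 4 - 4 = t.length := by omega
  rw [h4, List.drop_left, List.take_left]

lemma aLoop_eq (cs : List Char) (i : Nat) :
    ∀ temp final, i < cs.length → temp.length ≤ 4 →
      aLoop cs i temp final = final ++ rchunks (cs.take (i + 1) ++ temp) := by
  induction i with
  | zero =>
    intro temp final hi htemp
    have hc : cs.getD 0 ' ' = cs[0] := List.getD_eq_getElem cs ' ' hi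
    have htake : cs.take 1 = [cs[0]] := by
      rw [List.take_one]; simp [List.head?_eq_getElem?, List.getElem?_eq_getElem hi]
    by_cases h4 : temp.length = 4
    · have hr : rchunks (cs.take (0 + 1) ++ temp) = temp :: [[cs[0]]] := by
        rw [show (0 : Nat) + 1 = 1 from rfl, htake,
            rchunks_append4 [cs[0]] temp (by simp) h4,
            rchunks_small [cs[0]] (by simp) (by simp)]
      rw [hr, aLoop, aStep]
      simp [h4, List.getElem?_eq_getElem hi]
    · have hr : rchunks (cs.take (0 + 1) ++ temp) = [cs[0] :: temp] := by
        rw [show (0 : Nat) + 1 = 1 from rfl, htake,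
            show [cs[0]] ++ temp = cs[0] :: temp by simp,
            rchunks_small (cs[0] :: temp) (by simp) (by simp; omega)]
      rw [hr, aLoop, aStep]
      simp [h4, List.getElem?_eq_getElem hi]
  | succ i ih =>
    intro temp final hi htemp
    have hi' : i < cs.length := by omega
    have hc : cs.getD (i + 1) ' ' = cs[i + 1] := List.getD_eq_getElem cs ' ' hi
    have htake : cs.take (i + 1 + 1) = cs.take (i + 1) ++ [cs[i + 1]] := by
      rw [List.take_add_one]; simp [List.getElem?_eq_getElem hi]
    have htne : cs.take (i + 1) ++ [cs[i + 1]] ≠ [] := by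
      intro h; simp at h; rw [h] at hi; simp at hi
    rw [aLoop]
    simp only [if_neg (Nat.succ_ne_zero i), Nat.add_sub_cancel, hc]
    rw [aStep]
    by_cases h4 : temp.length = 4
    · simp only [if_pos h4, if_neg (Nat.succ_ne_zero i)]
      rw [ih [cs[i + 1]] (final ++ [temp]) hi' (by simp)]
      rw [htake, List.append_assoc,
          rchunks_append4 (cs.take (i + 1) ++ [cs[i + 1]]) temp htne h4]
      simp
    · simp only [if_neg h4, if_neg (Nat.succ_ne_zero i)]
      rw [ih (cs[i + 1] :: temp) final hi' (by simp; omega)]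
      rw [htake, List.append_assoc]
      simp

lemma bLoop_eq (cs : List Char) (i : Nat) (hi : i ≤ cs.length) :
    bLoop cs i = (rchunks (cs.take i)).map pvHex := by
  induction i using Nat.strong_induction_on with
  | _ i ih =>
    match i, hi with
    | 0, _ => rw [bLoop]; simp [rchunks]
    | Nat.succ j, hi =>
      simp only [Nat.succ_eq_add_one] at *
      rw [bLoop]
      simp only [if_neg (Nat.succ_ne_zero j)]
      have hslice : PySem.List.slice cs (some ((j + 1 - 4 : Nat) : Int)) (some ((j + 1 : Nat) : Int))
          = (cs.drop (j + 1 - 4)).take (j + 1 - (j + 1 - 4)) := PySem.List.slice_natCast cs _ _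
      have hlen : (cs.take (j + 1)).length = j + 1 := by simp; omega
      have hne : cs.take (j + 1) ≠ [] := by
        intro h; rw [h] at hlen; simp at hlen
      by_cases hle : j + 1 ≤ 4
      · have h0 : j + 1 - 4 = 0 := by omega
        rw [hslice, h0]
        simp only [List.drop_zero, Nat.sub_zero]
        rw [bLoop]
        rw [rchunks_small (cs.take (j + 1)) hne (by omega)]
        simp
      · have hr : rchunks (cs.take (j + 1))
            = (cs.take (j + 1)).drop (j + 1 - 4) :: rchunks (cs.take (j + 1 - 4)) := by
          rw [rchunks, if_neg hne, if_neg (by rw [hlen]; omega), hlen, List.take_take]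
          have hmin : min (j + 1 - 4) (j + 1) = j + 1 - 4 := by omega
          rw [hmin]
        rw [hslice, ih (j + 1 - 4) (by omega) (by omega), hr]
        rw [List.drop_take]
        simp

-- ===== VERDICT (by name: the statement is the Claim_ definition above) =====
theorem transform_spec : Claim_equal_transform := by
  intro x _ _
  unfold Spec_transform transform transform_alt
  by_cases h0 : x.toList.length = 0
  · have hnil : x.toList = [] := List.eq_nil_of_length_eq_zero h0
    rw [hnil]
    simp [bLoop]
  · simp only [if_neg h0]
    rw [aLoop_eq x.toList (x.toList.length - 1) [] [] (by omega) (by simp)]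
    have h1 : x.toList.length - 1 + 1 = x.toList.length := by omega
    rw [h1, bLoop_eq x.toList x.toList.length (le_refl _)]
    simp
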